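-- pv_equiv track=rewrite | github.com/N2Banks/Intersective-Polynomials-Algorithms | search_possible_galois_groups.py | accel_asc
-- ===== SOURCE A (Python) =====
-- def accel_asc(d):
--     if d <= 1:
--         return  # No valid partitions if d <= 1
--
--     a = [0 for i in range(d + 1)]
--     k = 1
--     y = d - 1
--     while k != 0:
--         x = a[k - 1] + 1
--         k -= 1
--         while 2 * x <= y:
--             a[k] = x
--             y -= x
--             k += 1
--         l = k + 1
--         while x <= y:
--             a[k] = x
--             a[l] = y
--             partition = a[:k + 2]
--             if 1 not in partition and d not in partition:
--                 yield partition
--             x += 1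
--             y -= 1
--         a[k] = x + y
--         y = x + y - 1
--         partition = a[:k + 1]
--         if 1 not in partition and d not in partition:
--             yield partition
-- ===== SOURCE B (Python) =====
-- def accel_asc(d):
--     # Recursive generation: non-decreasing partitions of n with every part >= minpart,
--     # smallest first part first, single-part partition [n] last (same order as A).
--     if d <= 1:
--         return
--     def gen(n, minpart):
--         for first in range(minpart, n // 2 + 1):
--             for rest in gen(n - first, first):
--                 yield [first] + rest
--         if n >= minpart:
--             yield [n]
--     # minpart = 2 rules out part 1 by construction; [d] is the only parts>=2
--     # partition containing d, and it is exactly the length-1 output.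
--     for p in gen(d, 2):
--         if len(p) > 1:
--             yield p
-- ===== Notes on version B (the rewrite author's own statement) =====
-- stated objective: simpler
-- what changed: Replaced the imperative accel_asc stack machine (mutable array, three nested while loops, per-partition membership scans for parts 1 and d) by a recursive generator gen(n, minpart) that builds partitions with parts >= 2 directly and skips only the single-part [d], emitting the same partitions in the same order.
import Mathlib
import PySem

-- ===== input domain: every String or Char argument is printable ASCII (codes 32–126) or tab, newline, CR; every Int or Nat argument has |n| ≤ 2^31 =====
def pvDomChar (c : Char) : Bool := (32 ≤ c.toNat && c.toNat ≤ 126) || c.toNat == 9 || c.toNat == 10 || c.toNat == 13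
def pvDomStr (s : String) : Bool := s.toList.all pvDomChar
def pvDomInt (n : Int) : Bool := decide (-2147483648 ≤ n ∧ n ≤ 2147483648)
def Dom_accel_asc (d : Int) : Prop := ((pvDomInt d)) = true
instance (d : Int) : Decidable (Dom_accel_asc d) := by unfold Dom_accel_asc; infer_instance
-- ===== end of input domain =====

-- B replaces A's imperative stack machine by a recursive partition generator
-- (objective: simpler); both emit the same lists in the same order.

-- ===== PORT A =====

-- Python `a[i] = v`; exact for the reachable indices 0 ≤ i < len a (A never
-- assigns out of range or to a negative index on any d).
def aset (a : List Int) (i : Int) (v : Int) : List Int := a.set i.toNat v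

-- inner `while 2 * x <= y` loop; the fuel y.toNat + 1 is a pure totality
-- guard (each pass decreases y by x ≥ 1), never exhausted on reachable states.
def pushLoop : Nat → List Int → Int → Int → Int → List Int × Int × Int
  | 0, a, k, y, _ => (a, k, y)
  | f+1, a, k, y, x =>
      if 2*x ≤ y then pushLoop f (aset a k x) (k+1) (y-x) x else (a, k, y)

-- inner `while x <= y` loop; fuel (y-x).toNat + 1 is a totality guard
-- (each pass decreases y - x by 2), never exhausted on reachable states.
def pairLoop : Nat → Int → List Int → Int → Int → Int → Int → List (List Int) →
    List Int × Int × Int × List (List Int)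
  | 0, _, a, _, _, y, x, out => (a, x, y, out)
  | f+1, d, a, k, l, y, x, out =>
      if x ≤ y then
        let a1 := aset a k x
        let a2 := aset a1 l y
        let part := PySem.List.slice a2 none (some (k+2))     -- a[:k+2]
        let out1 := if !part.contains 1 && !part.contains d then out ++ [part] else out
        pairLoop f d a2 k l (y-1) (x+1) out1
      else (a, x, y, out)

-- outer `while k != 0` loop; the fuel 2^(d-1).toNat is a totality guard and is
-- proved sufficient below (the loop runs `sigma 1 (d-1) ≤ 2^(d-1)` times).
def outerLoop : Nat → Int → List Int → Int → Int → List (List Int) → List (List Int)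
  | 0, _, _, _, _, out => out
  | f+1, d, a, k, y, out =>
      if k ≠ 0 then
        let x := PySem.List.pyGetD a (k-1) 0 + 1              -- a[k-1] + 1 (index in range on reachable states)
        let k1 := k - 1
        let s1 := pushLoop (y.toNat+1) a k1 y x
        let a1 := s1.1
        let k2 := s1.2.1
        let y1 := s1.2.2
        let l := k2 + 1
        let s2 := pairLoop ((y1-x).toNat+1) d a1 k2 l y1 x out
        let a2 := s2.1
        let x1 := s2.2.1
        let y2 := s2.2.2.1
        let out1 := s2.2.2.2
        let a3 := aset a2 k2 (x1+y2)
        let y3 := x1 + y2 - 1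
        let part := PySem.List.slice a3 none (some (k2+1))    -- a[:k+1]
        let out2 := if !part.contains 1 && !part.contains d then out1 ++ [part] else out1
        outerLoop f d a3 k2 y3 out2
      else out

def accel_asc (d : Int) : List (List Int) :=
  if d ≤ 1 then []
  else outerLoop (2 ^ (d-1).toNat) d (List.replicate (d+1).toNat 0) 1 (d-1) []

-- ===== PORT B =====

-- `gen(n, minpart)` of Source B; the fuel is a totality guard (every recursive
-- call has first ≥ 1, so n strictly decreases), never exhausted as called.
def genB : Nat → Int → Int → List (List Int)
  | 0, _, _ => []
  | f+1, n, m =>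
      let out := (PySem.List.pyRange m (PySem.Int.floordiv n 2 + 1) 1).foldl
        (fun out first => out ++ (genB f (n - first) first).map (fun rest => first :: rest)) []
      if m ≤ n then out ++ [[n]] else out

def accel_asc_alt (d : Int) : List (List Int) :=
  if d ≤ 1 then []
  else (genB (d.toNat+1) d 2).filter (fun p => decide (1 < p.length))

-- ===== PRECONDITION & SPEC =====
def Spec_accel_asc (d : Int) (out : List (List Int)) : Prop := out = accel_asc_alt d
instance (d : Int) (out : List (List Int)) : Decidable (Spec_accel_asc d out) := by unfold Spec_accel_asc; infer_instance

-- ===== CLAIM (what is proved, stated in full; the proofs are below) =====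
def Claim_equal_accel_asc : Prop := ∀ (d : Int), Dom_accel_asc d → Spec_accel_asc d (accel_asc d)

-- ===== LEMMAS AND PROOFS =====

-- ---- pure gen-side machinery ----

-- Python's `1 not in p and d not in p`
def keepB (d : Int) (p : List Int) : Bool := !p.contains 1 && !p.contains d

def filterK (d : Int) (l : List (List Int)) : List (List Int) := l.filter (keepB d)

lemma filterK_cons (d : Int) (p : List Int) (l : List (List Int)) :
    filterK d (p :: l) = (if keepB d p then [p] else []) ++ filterK d l := by
  unfold filterK
  rw [List.filter_cons]
  split_ifs <;> simp

-- continuation semantics of A's outer loop, on the REVERSED stack rp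
def EE (F : Nat) : List Int → Int → List (List Int)
  | [], _ => []
  | v :: rp, y => ((genB F (v+1+y) (v+1)).map (fun w => rp.reverse ++ w)) ++ EE F rp (v+y)

def EmitMid (F : Nat) (rp : List Int) (x y : Int) : List (List Int) :=
  (genB F (x+y) x).map (fun w => rp.reverse ++ w) ++ EE F rp (x+y-1)

-- number of outer-loop iterations needed to emit the subtree at (x, y)
def sigma (x y : Int) : Nat :=
  if h : x < 1 ∨ y < 0 then 1
  else if h2 : 2*x ≤ y then sigma x (y - x) + sigma (x+1) (y-1)
  else if h3 : x ≤ y then sigma (x+1) (y-1)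
  else 1
termination_by y.toNat
decreasing_by
  · omega
  · omega
  · omega

def Iters : List Int → Int → Nat
  | [], _ => 0
  | v :: rp, y => sigma (v+1) y + Iters rp (v+y)

def Itm (rp : List Int) (x y : Int) : Nat := sigma x y + Iters rp (x+y-1)

-- stack-shape invariant: all entries ≥ 0, all but the bottom ≥ 1
def SInv (rp : List Int) : Prop := (∀ e ∈ rp, 0 ≤ e) ∧ (∀ e ∈ rp.dropLast, 1 ≤ e)

lemma sigma_pos (x y : Int) : 1 ≤ sigma x y := by
  fun_induction sigma x y <;> omega

lemma sigma_le_pow (x y : Int) : sigma x y ≤ 2 ^ y.toNat := by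
  fun_induction sigma x y with
  | case1 x y h => exact Nat.one_le_two_pow
  | case2 x y h h2 ih1 ih2 =>
      have h1 : (y - x).toNat ≤ y.toNat - 1 := by omega
      have h3 : (y - 1).toNat = y.toNat - 1 := by omega
      have h4 : 1 ≤ y.toNat := by omega
      calc sigma x (y - x) + sigma (x+1) (y-1)
          ≤ 2 ^ (y - x).toNat + 2 ^ (y - 1).toNat := Nat.add_le_add ih1 ih2
        _ ≤ 2 ^ (y.toNat - 1) + 2 ^ (y.toNat - 1) := by
            rw [h3]; exact Nat.add_le_add_right (Nat.pow_le_pow_right (by omega) h1) _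
        _ = 2 ^ (y.toNat - 1 + 1) := by ring
        _ ≤ 2 ^ y.toNat := Nat.pow_le_pow_right (by omega) (by omega)
  | case3 x y h h2 h3 ih =>
      have h4 : (y - 1).toNat ≤ y.toNat := by omega
      exact le_trans ih (Nat.pow_le_pow_right (by omega) h4)
  | case4 => exact Nat.one_le_two_pow

lemma sigma_push {x y : Int} (hx : 1 ≤ x) (hy : 0 ≤ y) (h : 2*x ≤ y) :
    sigma x y = sigma x (y - x) + sigma (x+1) (y-1) := by
  rw [sigma]; rw [dif_neg (by omega), dif_pos h]

lemma sigma_pair {x y : Int} (hx : 1 ≤ x) (h2 : ¬ 2*x ≤ y) (h : x ≤ y) :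
    sigma x y = sigma (x+1) (y-1) := by
  have hy : 0 ≤ y := by omega
  rw [sigma]; rw [dif_neg (by omega), dif_neg h2, dif_pos h]

lemma sigma_single {x y : Int} (hx : 1 ≤ x) (hy : 0 ≤ y) (h : y < x) :
    sigma x y = 1 := by
  rw [sigma]; rw [dif_neg (by omega), dif_neg (by omega), dif_neg (by omega)]

lemma SInv_len_le_sum {rp : List Int} (h : SInv rp) : (rp.length : Int) ≤ rp.sum + 1 := by
  induction rp with
  | nil => simp
  | cons v rp ih =>
      obtain ⟨h0, h1⟩ := h
      cases rp with
      | nil =>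
          have := h0 v (by simp)
          simp; omega
      | cons w rp' =>
          have hv : 1 ≤ v := h1 v (by simp [List.dropLast])
          have ih' := ih ⟨fun e he => h0 e (by simp [he]),
            fun e he => h1 e (by simp [List.dropLast_cons_of_ne_nil, he])⟩
          simp only [List.length_cons, List.sum_cons] at ih' ⊢
          push_cast at ih' ⊢
          omega

lemma SInv_sum_nonneg {rp : List Int} (h : SInv rp) : 0 ≤ rp.sum := by
  induction rp with
  | nil => simp
  | cons v rp ih =>
      obtain ⟨h0, h1⟩ := h
      have hv := h0 v (by simp)
      have := ih ⟨fun e he => h0 e (by simp [he]), fun e he => by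
        cases rp with
        | nil => simp at he
        | cons w rp' => exact h1 e (by simp [List.dropLast_cons_of_ne_nil, he])⟩
      simp only [List.sum_cons]; omega

lemma SInv_tail {v : Int} {rp : List Int} (h : SInv (v :: rp)) : SInv rp := by
  obtain ⟨h0, h1⟩ := h
  refine ⟨fun e he => h0 e (by simp [he]), fun e he => ?_⟩
  cases rp with
  | nil => simp at he
  | cons w rp' =>
      exact h1 e (by simp only [List.dropLast_cons_of_ne_nil (by simp : w :: rp' ≠ [])]; simp [he])

lemma SInv_push {v : Int} {rp : List Int} (h : SInv rp) (hv : 1 ≤ v) : SInv (v :: rp) := by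
  obtain ⟨h0, h1⟩ := h
  refine ⟨fun e he => ?_, fun e he => ?_⟩
  · rcases List.mem_cons.1 he with rfl | he
    · omega
    · exact h0 e he
  · cases rp with
    | nil => simp at he
    | cons w rp' =>
        rw [List.dropLast_cons_of_ne_nil (by simp)] at he
        rcases List.mem_cons.1 he with rfl | he
        · exact hv
        · exact h1 e he

-- ---- genB facts ----

lemma genB_flat (f : Nat) (n m : Int) :
    genB (f+1) n m =
      (PySem.List.pyRange m (PySem.Int.floordiv n 2 + 1) 1).flatMap
        (fun first => (genB f (n - first) first).map (fun rest => first :: rest)) ++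
      (if m ≤ n then [[n]] else []) := by
  show (if m ≤ n then
      ((PySem.List.pyRange m (PySem.Int.floordiv n 2 + 1) 1).foldl
        (fun out first => out ++ (genB f (n - first) first).map (fun rest => first :: rest)) []) ++ [[n]]
    else
      ((PySem.List.pyRange m (PySem.Int.floordiv n 2 + 1) 1).foldl
        (fun out first => out ++ (genB f (n - first) first).map (fun rest => first :: rest)) [])) = _
  rw [PySem.List.foldl_append_eq_flatMap]
  split_ifs <;> simp

lemma genB_stable : ∀ (f g : Nat) (n m : Int), 1 ≤ m → n.toNat < f → n.toNat < g →
    genB f n m = genB g n m := by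
  intro f
  induction f with
  | zero => intro g n m _ hf; omega
  | succ f ih =>
      intro g n m hm hf hg
      cases g with
      | zero => omega
      | succ g =>
          rw [genB_flat, genB_flat]
          congr 1
          rw [List.flatMap_def, List.flatMap_def]
          congr 1
          apply List.map_congr_left
          intro first hfirst
          rw [PySem.List.mem_pyRange_one] at hfirst
          have hfd : PySem.Int.floordiv n 2 = n / 2 :=
            PySem.Int.floordiv_eq_ediv_of_pos (by norm_num)
          rw [hfd] at hfirst
          have h1 : 1 ≤ first := le_trans hm hfirst.1
          have h2 : 2 * first ≤ n := by omega
          rw [ih g (n - first) first h1 (by omega) (by omega)]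

-- split off the first branch: gen (x+y) x = map (x::) (gen y x) ++ gen (x+y) (x+1)
lemma genB_split {F : Nat} {x y : Int} (hx : 1 ≤ x) (hxy : x ≤ y) (hF : (x+y).toNat < F) :
    genB F (x+y) x = (genB F y x).map (fun w => x :: w) ++ genB F (x+y) (x+1) := by
  have hy1 : 1 ≤ y := le_trans hx hxy
  obtain ⟨F', rfl⟩ : ∃ F', F = F' + 1 := ⟨F - 1, by omega⟩
  rw [genB_flat F' (x+y) x, genB_flat F' (x+y) (x+1)]
  have hfd : PySem.Int.floordiv (x+y) 2 = (x+y) / 2 :=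
    PySem.Int.floordiv_eq_ediv_of_pos (by norm_num)
  have hcons : PySem.List.pyRange x (PySem.Int.floordiv (x+y) 2 + 1) 1 =
      x :: PySem.List.pyRange (x+1) (PySem.Int.floordiv (x+y) 2 + 1) 1 := by
    apply PySem.List.pyRange_one_cons
    rw [hfd]; omega
  rw [hcons]
  rw [List.flatMap_cons]
  have hxyx : x + y - x = y := by ring
  rw [hxyx]
  have hstab : genB F' y x = genB (F'+1) y x := by
    apply genB_stable _ _ _ _ hx <;> omega
  rw [hstab]
  rw [if_pos (by omega : x ≤ x + y), if_pos (by omega : x + 1 ≤ x + y)]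
  simp [List.append_assoc]

-- no branch fires: gen n m = [[n]] when m ≤ n < 2m
lemma genB_small {F : Nat} {n m : Int} (_hm : 1 ≤ m) (h1 : m ≤ n) (h2 : n < 2*m) (hF : 1 ≤ F) :
    genB F n m = [[n]] := by
  obtain ⟨F', rfl⟩ : ∃ F', F = F' + 1 := ⟨F - 1, by omega⟩
  rw [genB_flat]
  have hfd : PySem.Int.floordiv n 2 = n / 2 :=
    PySem.Int.floordiv_eq_ediv_of_pos (by norm_num)
  rw [PySem.List.pyRange_one_eq_nil (by rw [hfd]; omega)]
  rw [if_pos h1]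
  simp

lemma genB_mem : ∀ (f : Nat) (n m : Int) (w : List Int), w ∈ genB f n m →
    (∀ e ∈ w, m ≤ e) ∧ w.sum = n ∧ w ≠ [] := by
  intro f
  induction f with
  | zero => intro n m w h; simp [genB] at h
  | succ f ih =>
      intro n m w h
      rw [genB_flat, List.mem_append] at h
      rcases h with h | h
      · rw [List.mem_flatMap] at h
        obtain ⟨first, hfirst, hw⟩ := h
        rw [PySem.List.mem_pyRange_one] at hfirst
        rw [List.mem_map] at hw
        obtain ⟨rest, hrest, rfl⟩ := hw
        obtain ⟨hall, hsum, _⟩ := ih (n - first) first rest hrest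
        refine ⟨?_, by simp [hsum], by simp⟩
        intro e he
        rcases List.mem_cons.1 he with rfl | he
        · exact hfirst.1
        · exact le_trans hfirst.1 (hall e he)
      · split_ifs at h with hmn
        · simp at h
          subst h
          exact ⟨by intro e he; simp at he; omega, by simp, by simp⟩
        · simp at h

-- ---- emit-identities (the algebra of one machine step) ----

lemma emit_push {F : Nat} {rp : List Int} {x y : Int}
    (hx : 1 ≤ x) (h : 2*x ≤ y) (hF : (x+y).toNat < F) :
    EmitMid F rp x y = EmitMid F (x :: rp) x (y - x) := by
  have e1 : x + (y - x) = y := by ring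
  have e2 : x + (y - x) - 1 = y - 1 := by ring
  have e3 : x + 1 + (y - 1) = x + y := by ring
  have e4 : x + (y - 1) = x + y - 1 := by ring
  simp only [EmitMid, e1, EE, e3, e4]
  rw [genB_split hx (by omega) hF]
  simp [List.map_map, Function.comp_def, List.append_assoc]

lemma emit_pair {F : Nat} {rp : List Int} {x y : Int}
    (hx : 1 ≤ x) (h1 : x ≤ y) (h2 : y < 2*x) (hF : (x+y).toNat < F) :
    EmitMid F rp x y = (rp.reverse ++ [x, y]) :: EmitMid F rp (x+1) (y-1) := by
  have e3 : x + 1 + (y - 1) = x + y := by ring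
  simp only [EmitMid, e3]
  rw [genB_split hx h1 hF, genB_small hx h1 h2 (by omega)]
  simp

lemma emit_single {F : Nat} {rp : List Int} {x y : Int}
    (hx : 1 ≤ x) (hy : 0 ≤ y) (h : y < x) (hF : 1 ≤ F) :
    EmitMid F rp x y = (rp.reverse ++ [x+y]) :: EE F rp (x+y-1) := by
  simp only [EmitMid]
  rw [genB_small hx (by omega) (by omega) hF]
  simp

lemma EE_cons (F : Nat) (v : Int) (rp : List Int) (y : Int) :
    EE F (v :: rp) y = EmitMid F rp (v+1) y := by
  have e1 : v + 1 + y - 1 = v + y := by ring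
  simp only [EmitMid, e1, EE]

-- ---- counting identities ----

lemma itm_push {rp : List Int} {x y : Int} (hx : 1 ≤ x) (hy : 0 ≤ y) (h : 2*x ≤ y) :
    Itm rp x y = Itm (x :: rp) x (y - x) := by
  unfold Itm
  rw [sigma_push hx hy h]
  show _ = sigma x (y - x) + Iters (x :: rp) (x + (y - x) - 1)
  have : x + (y - x) - 1 = y - 1 := by ring
  rw [this]
  show _ = sigma x (y - x) + (sigma (x+1) (y-1) + Iters rp (x + (y-1)))
  have : x + (y - 1) = x + y - 1 := by ring
  rw [this]; omega

lemma itm_pair {rp : List Int} {x y : Int} (hx : 1 ≤ x) (h2 : ¬ 2*x ≤ y) (h : x ≤ y) :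
    Itm rp x y = Itm rp (x+1) (y-1) := by
  unfold Itm
  rw [sigma_pair hx h2 h]
  have : x + 1 + (y - 1) - 1 = x + y - 1 := by ring
  rw [this]

lemma itm_single {rp : List Int} {x y : Int} (hx : 1 ≤ x) (hy : 0 ≤ y) (h : y < x) :
    Itm rp x y = 1 + Iters rp (x+y-1) := by
  unfold Itm
  rw [sigma_single hx hy h]

-- ---- list/array helpers ----

lemma take_set_le (a : List Int) (i j : Nat) (v : Int) (hij : i ≤ j) :
    (a.set j v).take i = a.take i := by
  apply List.ext_getElem
  · simp
  · intro n h1 h2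
    simp only [List.getElem_take, List.getElem_set]
    rw [if_neg]
    simp at h1; omega

lemma take_set_succ (a : List Int) (i : Nat) (v : Int) (h : i < a.length) :
    (a.set i v).take (i+1) = a.take i ++ [v] := by
  apply List.ext_getElem
  · simp; omega
  · intro n h1 h2
    simp only [List.getElem_take, List.getElem_set]
    by_cases hn : n = i
    · subst hn
      rw [if_pos rfl, List.getElem_append_right (by simp)]
      simp
    · rw [if_neg (by omega), List.getElem_append_left (by simp at h1 ⊢; omega)]
      simp

lemma getD_of_take {a : List Int} {t : List Int} {v : Int} {k : Nat}
    (h : a.take (k+1) = t ++ [v]) (ht : t.length = k) : a.getD k 0 = v := by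
  have hlen : k < a.length := by
    by_contra hk
    have : (a.take (k+1)).length = a.length := by simp; omega
    rw [h] at this; simp at this
    have : a.length ≤ k := by omega
    omega
  have : (a.take (k+1))[k]? = some v := by
    rw [h, List.getElem?_append_right (by omega)]
    simp [ht]
  rw [List.getElem?_take_of_lt (by omega)] at this
  rw [List.getD_eq_getElem?_getD, this]
  rfl

-- ---- machine lemmas ----

lemma pushLoop_spec (g : Nat) : ∀ (a rp : List Int) (x y : Int),
    1 ≤ x → 0 ≤ y → y.toNat < g →
    a.take rp.length = rp.reverse →
    (rp.length : Int) + y ≤ (a.length : Int) - 1 →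
    SInv rp →
    ∃ a' rp' y',
      pushLoop g a (rp.length : Int) y x = (a', (rp'.length : Int), y') ∧
      a'.take rp'.length = rp'.reverse ∧ a'.length = a.length ∧ SInv rp' ∧
      rp'.sum + y' = rp.sum + y ∧ 0 ≤ y' ∧ ¬ (2*x ≤ y') ∧
      (rp'.length : Int) + y' ≤ (a.length : Int) - 1 ∧
      (∀ F : Nat, (x+y).toNat < F → EmitMid F rp' x y' = EmitMid F rp x y) ∧
      Itm rp' x y' = Itm rp x y := by
  induction g with
  | zero => intro a rp x y _ _ hg; omega
  | succ g ih =>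
      intro a rp x y hx hy hg htake hbound hS
      by_cases hcond : 2*x ≤ y
      · have hkl : rp.length < a.length := by omega
        have hset : aset a (rp.length : Int) x = a.set rp.length x := by
          unfold aset; norm_num
        have hlen1 : ((x :: rp).length : Int) = (rp.length : Int) + 1 := by push_cast [List.length_cons]; ring
        have step : pushLoop (g+1) a (rp.length : Int) y x
            = pushLoop g (a.set rp.length x) (((x :: rp).length : Int)) (y-x) x := by
          simp only [pushLoop, if_pos hcond, hset, hlen1]
        obtain ⟨a', rp', y', hres, h1, h2, h3, h4, h5, h6, h7, h8, h9⟩ :=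
          ih (a.set rp.length x) (x :: rp) x (y - x) hx (by omega) (by omega)
            (by rw [List.length_cons, take_set_succ a rp.length x hkl, htake]; simp)
            (by rw [List.length_set]; omega)
            (SInv_push hS hx)
        refine ⟨a', rp', y', by rw [step, hres], h1, by rw [h2, List.length_set], h3,
          by simp only [List.sum_cons] at h4; omega, h5, h6,
          by rw [List.length_set] at h7; exact h7, ?_, ?_⟩
        · intro F hF
          rw [h8 F (by omega), ← emit_push hx hcond hF]
        · rw [h9, ← itm_push hx hy hcond]
      · refine ⟨a, rp, y, ?_, htake, rfl, hS, rfl, hy, hcond, hbound,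
          fun F _ => rfl, rfl⟩
        simp only [pushLoop, if_neg hcond]

lemma pairLoop_spec (g : Nat) : ∀ (d : Int) (a rp : List Int) (x y : Int) (out : List (List Int)),
    1 ≤ x → 0 ≤ y → y < 2*x → (x ≤ y → (y - x).toNat < g) →
    a.take rp.length = rp.reverse →
    (rp.length : Int) + y ≤ (a.length : Int) - 1 →
    ∃ a' x' y' out',
      pairLoop g d a (rp.length : Int) ((rp.length : Int) + 1) y x out = (a', x', y', out') ∧
      a'.take rp.length = rp.reverse ∧ a'.length = a.length ∧
      1 ≤ x' ∧ 0 ≤ y' ∧ y' < x' ∧ x' + y' = x + y ∧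
      (∀ F : Nat, (x+y).toNat < F →
        out' ++ filterK d (EmitMid F rp x' y') = out ++ filterK d (EmitMid F rp x y)) ∧
      Itm rp x' y' = Itm rp x y := by
  induction g with
  | zero =>
      intro d a rp x y out hx hy _ hg htake _
      have hcond : ¬ x ≤ y := fun h => by have := hg h; omega
      exact ⟨a, x, y, out, rfl, htake, rfl, hx, hy, by omega, rfl, fun F _ => rfl, rfl⟩
  | succ g ih =>
      intro d a rp x y out hx hy h2x hg htake hbound
      by_cases hcond : x ≤ y
      · have hy1 : 1 ≤ y := le_trans hx hcond
        have hkl : rp.length < a.length := by omega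
        have hkl1 : rp.length + 1 < a.length := by omega
        have hset1 : aset a (rp.length : Int) x = a.set rp.length x := by
          unfold aset; norm_num
        have hset2 : aset (a.set rp.length x) ((rp.length : Int) + 1) y
            = (a.set rp.length x).set (rp.length + 1) y := by
          unfold aset
          have e : ((rp.length : Int) + 1).toNat = rp.length + 1 := by omega
          rw [e]
        have ha2take : ((a.set rp.length x).set (rp.length + 1) y).take (rp.length + 2)
            = rp.reverse ++ [x, y] := by
          have e : rp.length + 2 = (rp.length + 1) + 1 := by omega
          rw [e, take_set_succ _ _ _ (by simp [hkl1]),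
            take_set_succ a rp.length x hkl, htake]
          simp
        have hpart : PySem.List.slice ((a.set rp.length x).set (rp.length + 1) y)
            none (some ((rp.length : Int) + 2)) = rp.reverse ++ [x, y] := by
          rw [PySem.List.slice_to _ (by omega)]
          have e : (((rp.length : Int)) + 2).toNat = rp.length + 2 := by omega
          rw [e, ha2take]
        have step : pairLoop (g+1) d a (rp.length : Int) ((rp.length : Int) + 1) y x out
            = pairLoop g d ((a.set rp.length x).set (rp.length + 1) y)
                (rp.length : Int) ((rp.length : Int) + 1) (y-1) (x+1)
                (if keepB d (rp.reverse ++ [x, y]) then out ++ [rp.reverse ++ [x, y]] else out) := by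
          simp only [pairLoop, if_pos hcond, hset1, hset2, hpart, keepB]
          rfl
        obtain ⟨a', x', y', out', hres, h1, h2, h3, h4, h5, h6, h7, h8⟩ :=
          ih d ((a.set rp.length x).set (rp.length + 1) y) rp (x+1) (y-1)
            (if keepB d (rp.reverse ++ [x, y]) then out ++ [rp.reverse ++ [x, y]] else out)
            (by omega) (by omega) (by omega) (by intro h; have := hg hcond; omega)
            (by rw [take_set_le _ _ _ _ (by omega), take_set_le _ _ _ _ (by omega), htake])
            (by simp only [List.length_set]; omega)
        refine ⟨a', x', y', out', by rw [step, hres], h1,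
          by rw [h2]; simp, h3, h4, h5, by omega, ?_, ?_⟩
        · intro F hF
          have e : x + 1 + (y - 1) = x + y := by ring
          rw [h7 F (by omega), emit_pair hx hcond h2x hF, filterK_cons]
          split_ifs with hk
          · simp [List.append_assoc]
          · simp
        · rw [h8, ← itm_pair hx (by omega) hcond]
      · exact ⟨a, x, y, out, by simp only [pairLoop, if_neg hcond], htake, rfl,
          hx, hy, by omega, rfl, fun F _ => rfl, rfl⟩

lemma outer_spec (f : Nat) : ∀ (F : Nat) (d : Int) (a rp : List Int) (y : Int)
    (out : List (List Int)),
    a.take rp.length = rp.reverse →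
    (a.length : Int) = d + 1 →
    rp.sum + y + 1 = d →
    SInv rp → 0 ≤ y →
    Iters rp y ≤ f → d.toNat < F →
    outerLoop f d a (rp.length : Int) y out = out ++ filterK d (EE F rp y) := by
  induction f with
  | zero =>
      intro F d a rp y out htake hlen hsum hS hy hIt hF
      cases rp with
      | nil => simp [outerLoop, EE, filterK]
      | cons v rp0 =>
          exfalso
          have := sigma_pos (v+1) y
          have : Iters (v :: rp0) y ≥ 1 := by
            show sigma (v+1) y + Iters rp0 (v+y) ≥ 1
            omega
          omega
  | succ f ih =>
      intro F d a rp y out htake hlen hsum hS hy hIt hF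
      cases rp with
      | nil =>
          show outerLoop (f+1) d a ((0:Nat) : Int) y out = _
          simp only [Nat.cast_zero, outerLoop, ne_eq, not_true_eq_false, if_false]
          simp [EE, filterK]
      | cons v rp0 =>
          have hv : 0 ≤ v := hS.1 v (by simp)
          have hS0 : SInv rp0 := SInv_tail hS
          have hsum0 : 0 ≤ rp0.sum := SInv_sum_nonneg hS0
          have hlenb : (rp0.length : Int) ≤ rp0.sum + 1 := SInv_len_le_sum hS0
          have hsumc : (v :: rp0).sum = v + rp0.sum := by simp
          have hkne : (((v :: rp0).length : Nat) : Int) ≠ 0 := by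
            simp
            omega
          have hk1 : (((v :: rp0).length : Nat) : Int) - 1 = (rp0.length : Int) := by
            push_cast [List.length_cons]; ring
          have htake0 : a.take rp0.length = rp0.reverse := by
            have h1 : (rp0.reverse ++ [v]).take rp0.length = rp0.reverse := by
              rw [List.take_append_of_le_length (by simp)]
              simp
            have h2 : a.take rp0.length = (a.take (rp0.length + 1)).take rp0.length := by
              rw [List.take_take]
              congr 1
              omega
            rw [h2]
            have e : a.take (rp0.length + 1) = rp0.reverse ++ [v] := by
              have := htake
              simp only [List.length_cons, List.reverse_cons] at this
              exact this
            rw [e, h1]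
          have hgetv : PySem.List.pyGetD a ((rp0.length : Nat) : Int) 0 = v := by
            rw [PySem.List.pyGetD_natCast]
            apply getD_of_take (t := rp0.reverse)
            · have := htake
              simp only [List.length_cons, List.reverse_cons] at this
              exact this
            · simp
          -- run the push loop
          obtain ⟨a1, rp1, y1, hres1, p1, p2, p3, p4, p5, p6, p7, p8, p9⟩ :=
            pushLoop_spec (y.toNat + 1) a rp0 (v+1) y (by omega) hy (by omega) htake0
              (by rw [hlen]; omega) hS0
          -- run the pair loop
          obtain ⟨a2, x1, y2, out1, hres2, q1, q2, q3, q4, q5, q6, q7, q8⟩ :=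
            pairLoop_spec ((y1 - (v+1)).toNat + 1) d a1 rp1 (v+1) y1 out (by omega) p5
              (by omega) (fun _ => by omega) p1 (by rw [p2]; exact p7)
          have hkl2 : rp1.length < a2.length := by
            rw [q2, p2]
            have h1 := p7
            have h2 := p6
            omega
          have hset3 : aset a2 ((rp1.length : Nat) : Int) (x1 + y2) = a2.set rp1.length (x1 + y2) := by
            unfold aset; norm_num
          have hpart : PySem.List.slice (a2.set rp1.length (x1 + y2))
              none (some (((rp1.length : Nat) : Int) + 1)) = rp1.reverse ++ [x1 + y2] := by
            rw [PySem.List.slice_to _ (by omega)]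
            have e : (((rp1.length : Int)) + 1).toNat = rp1.length + 1 := by omega
            rw [e, take_set_succ _ _ _ hkl2, q1]
          have step : outerLoop (f+1) d a (((v :: rp0).length : Nat) : Int) y out
              = outerLoop f d (a2.set rp1.length (x1 + y2)) ((rp1.length : Nat) : Int)
                  (x1 + y2 - 1)
                  (if keepB d (rp1.reverse ++ [x1 + y2])
                    then out1 ++ [rp1.reverse ++ [x1 + y2]] else out1) := by
            simp only [outerLoop, if_pos hkne, hk1, hgetv, hres1, hres2, hset3, hpart, keepB]
            rfl
          have hxyd : v + 1 + y ≤ d := by omega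
          have hsum1 : rp1.sum + y1 = rp0.sum + y := p4
          have hIters : Iters (v :: rp0) y = 1 + Iters rp1 (x1 + y2 - 1) := by
            show sigma (v+1) y + Iters rp0 (v+y) = _
            have e0 : v + y = (v+1) + y - 1 := by ring
            have h0 : sigma (v+1) y + Iters rp0 (v+y) = Itm rp0 (v+1) y := by
              unfold Itm; rw [e0]
            rw [h0, ← p9, ← q8]
            exact itm_single q3 q4 q5
          have ihres := ih F d (a2.set rp1.length (x1 + y2)) rp1 (x1 + y2 - 1)
            (if keepB d (rp1.reverse ++ [x1 + y2])
              then out1 ++ [rp1.reverse ++ [x1 + y2]] else out1)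
            (by rw [take_set_le _ _ _ _ (by omega)]; exact q1)
            (by rw [List.length_set, q2, p2]; exact hlen)
            (by have e : x1 + y2 = (v+1) + y1 := by omega
                omega)
            p3 (by omega) (by omega) hF
          rw [step, ihres]
          -- assemble the emitted output
          have hEE : EE F (v :: rp0) y = EmitMid F rp1 (v+1) y1 := by
            rw [EE_cons]
            exact (p8 F (by omega)).symm
          have hq : out1 ++ filterK d (EmitMid F rp1 x1 y2)
              = out ++ filterK d (EmitMid F rp1 (v+1) y1) := by
            apply q7
            have hs1 := SInv_sum_nonneg p3
            have h4 := p4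
            omega
          have hsingle : EmitMid F rp1 x1 y2
              = (rp1.reverse ++ [x1 + y2]) :: EE F rp1 (x1 + y2 - 1) := by
            exact emit_single q3 q4 q5 (by omega)
          rw [hsingle, filterK_cons] at hq
          rw [hEE]
          rw [← hq]
          split_ifs with hk <;> simp [List.append_assoc]

-- ---- assembling the two sides ----

lemma accel_asc_eq_filterK {d : Int} (hd : ¬ d ≤ 1) :
    accel_asc d = filterK d (genB (d.toNat+1) d 1) := by
  have hd2 : 2 ≤ d := by omega
  unfold accel_asc
  rw [if_neg hd]
  have hres := outer_spec (2 ^ (d-1).toNat) (d.toNat+1) d (List.replicate (d+1).toNat 0) [0] (d-1) []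
    (by rw [List.take_replicate]
        have e : min [(0:Int)].length (d+1).toNat = 1 := by simp; omega
        rw [e]
        rfl)
    (by simp; omega)
    (by simp)
    (by constructor <;> simp)
    (by omega)
    (by show sigma (0+1) (d-1) + Iters [] (0 + (d-1)) ≤ 2 ^ (d-1).toNat
        show sigma (0+1) (d-1) + 0 ≤ 2 ^ (d-1).toNat
        simpa using sigma_le_pow 1 (d-1))
    (by omega)
  simp only [List.length_cons, List.length_nil, Nat.cast_one, zero_add] at hres
  rw [hres]
  have hEE : EE (d.toNat+1) [0] (d-1) = genB (d.toNat+1) d 1 := by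
    show ((genB (d.toNat+1) (0+1+(d-1)) (0+1)).map (fun w => ([] : List Int).reverse ++ w)) ++
      EE (d.toNat+1) [] (0+(d-1)) = _
    have e : (0:Int)+1+(d-1) = d := by ring
    rw [e]
    show _ ++ ([] : List (List Int)) = _
    simp
  rw [hEE]
  simp

lemma twoLe_sum : ∀ (l : List Int), (∀ e ∈ l, 2 ≤ e) → 2 * (l.length : Int) ≤ l.sum := by
  intro l
  induction l with
  | nil => simp
  | cons z l ih =>
      intro h
      have hz := h z (by simp)
      have := ih (fun e he => h e (by simp [he]))
      simp only [List.length_cons, List.sum_cons]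
      push_cast
      omega

lemma filterK_genB {d : Int} (hd : ¬ d ≤ 1) :
    filterK d (genB (d.toNat+1) d 1) =
      (genB (d.toNat+1) d 2).filter (fun p => decide (1 < p.length)) := by
  have hd2 : 2 ≤ d := by omega
  have e : d = 1 + (d - 1) := by ring
  have hsplit : genB (d.toNat+1) d 1
      = (genB (d.toNat+1) (d-1) 1).map (fun w => 1 :: w) ++ genB (d.toNat+1) d 2 := by
    conv_lhs => rw [e]
    rw [genB_split (by omega) (by omega) (by omega)]
    rw [← e]
    have e2 : (1:Int) + 1 = 2 := by ring
    rw [e2]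
  rw [hsplit]
  unfold filterK
  rw [List.filter_append]
  have h1 : ((genB (d.toNat+1) (d-1) 1).map (fun w => 1 :: w)).filter (keepB d) = [] := by
    rw [List.filter_map]
    have hfil : (genB (d.toNat+1) (d-1) 1).filter (keepB d ∘ (fun w => (1:Int) :: w)) = [] := by
      apply List.filter_eq_nil_iff.2
      intro w _
      simp [keepB]
    rw [hfil, List.map_nil]
  rw [h1, List.nil_append]
  apply List.filter_congr
  intro w hw
  obtain ⟨hall, hsum, hne⟩ := genB_mem _ _ _ _ hw
  have hno1 : w.contains 1 = false := by
    rw [List.contains_eq_mem]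
    simp only [decide_eq_false_iff_not]
    intro hmem
    have := hall 1 hmem
    omega
  match w, hne with
  | [z], _ =>
      have hz : z = d := by simpa using hsum
      subst hz
      simp [keepB, List.contains_eq_mem]
  | z1 :: z2 :: rest, _ =>
      have hlen2 : 2 ≤ ((z1 :: z2 :: rest).length : Int) := by simp; omega
      have hnod : (z1 :: z2 :: rest).contains d = false := by
        rw [List.contains_eq_mem]
        simp only [decide_eq_false_iff_not]
        intro hmem
        have hperm := (List.perm_cons_erase hmem).sum_eq
        have hsub : ∀ e ∈ (z1 :: z2 :: rest).erase d, 2 ≤ e := by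
          intro e he
          exact hall e (List.mem_of_mem_erase he)
        have hlenerase : ((z1 :: z2 :: rest).erase d).length = (z1 :: z2 :: rest).length - 1 :=
          List.length_erase_of_mem hmem
        have hge := twoLe_sum _ hsub
        rw [hlenerase] at hge
        simp only [List.sum_cons] at hperm hsum
        simp only [List.length_cons] at hge
        omega
      simp only [keepB]
      rw [hno1, hnod]
      simp

-- ===== VERDICT (by name: the statement is the Claim_ definition above) =====
theorem accel_asc_spec : Claim_equal_accel_asc := by
  intro d _
  unfold Spec_accel_asc accel_asc_alt
  by_cases hd : d ≤ 1
  · simp [accel_asc, hd]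
  · rw [if_neg hd, accel_asc_eq_filterK hd, filterK_genB hd]
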